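-- pv_equiv track=rewrite | github.com/NeilVibe/LocalizationTools | tests/fixtures/stringid/true_e2e_standard.py | find_duplicate_sources
-- ===== SOURCE A (Python) =====
-- from typing import List, Dict, Tuple
--
-- def find_duplicate_sources(entries: List[Dict]) -> Dict[str, List[Dict]]:
--     """
--     Find entries with duplicate Korean sources (different StringIDs).
--     These are the key test cases for StringID matching.
--     """
--     source_map = {}
--     for entry in entries:
--         src = entry["source"]
--         if src not in source_map:
--             source_map[src] = []
--         source_map[src].append(entry)
--
--     # Return only sources with multiple entries (duplicates)
--     return {src: entries for src, entries in source_map.items() if len(entries) > 1}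
-- ===== SOURCE B (Python) =====
-- def find_duplicate_sources(entries):
--     """
--     Find entries with duplicate Korean sources (different StringIDs).
--     Two passes: collect the distinct sources in first-appearance order,
--     then for each source gather its entries and keep only the groups
--     with more than one entry.
--     """
--     seen = []
--     for entry in entries:
--         src = entry["source"]
--         if src not in seen:
--             seen.append(src)
--     result = {}
--     for src in seen:
--         group = [e for e in entries if e["source"] == src]
--         if len(group) > 1:
--             result[src] = group
--     return result
-- ===== Notes on version B (the rewrite author's own statement) =====
-- stated objective: alternative
-- what changed: Replaces the single-pass dict-of-lists grouping plus post-filtering by a two-pass scheme: first collect the distinct sources in first-appearance order, then for each distinct source filter the entry list for its group and keep it only if it has more than one member.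
import Mathlib
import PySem

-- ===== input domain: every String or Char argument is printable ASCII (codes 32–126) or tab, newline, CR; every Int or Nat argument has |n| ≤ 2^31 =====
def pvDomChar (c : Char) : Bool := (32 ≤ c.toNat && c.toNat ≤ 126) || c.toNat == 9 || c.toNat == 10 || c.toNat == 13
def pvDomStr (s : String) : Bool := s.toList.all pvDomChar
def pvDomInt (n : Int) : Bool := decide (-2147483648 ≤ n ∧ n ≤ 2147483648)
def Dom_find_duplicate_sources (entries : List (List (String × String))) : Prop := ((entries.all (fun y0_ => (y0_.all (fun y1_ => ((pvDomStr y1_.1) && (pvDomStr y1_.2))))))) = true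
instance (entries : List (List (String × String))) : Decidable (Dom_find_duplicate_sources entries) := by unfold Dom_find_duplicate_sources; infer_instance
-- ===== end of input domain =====

-- B replaces A's single-pass dict-of-lists grouping + post-filter by two passes (distinct sources, then a per-source filter of the entry list); alternative decomposition, same results.


-- entry["source"]: first match in the association list; Pre_ guarantees the key is present, so the "" default is never used inside Pre_
def pvSrc (e : List (String × String)) : String :=
  ((e.find? (fun p => p.1 == "source")).map (·.2)).getD ""

-- ===== PORT A =====
def find_duplicate_sources (entries : List (List (String × String))) : List (String × List (List (String × String))) :=
  let source_map : PySem.Dict String (List (List (String × String))) :=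
    entries.foldl (fun m entry =>
      let src := pvSrc entry
      -- if src not in source_map: source_map[src] = []
      let m := if m.contains src then m else m.insert src []
      -- source_map[src].append(entry)
      m.modify src [] (fun l => l ++ [entry])) PySem.Dict.empty
  -- {src: entries for src, entries in source_map.items() if len(entries) > 1}
  source_map.items.filter (fun p => p.2.length > 1)

-- ===== PORT B =====
def find_duplicate_sources_alt (entries : List (List (String × String))) : List (String × List (List (String × String))) :=
  -- first pass: distinct sources in first-appearance order ("if src not in seen: seen.append(src)")
  let seen : List String := entries.foldl (fun s entry => PySem.Set.add s (pvSrc entry)) []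
  -- second pass: per-source group; "result[src] = group" appends, since seen is duplicate-free
  seen.foldl (fun res src =>
    let group := entries.filter (fun e => pvSrc e == src)
    if group.length > 1 then res ++ [(src, group)] else res) []

-- ===== PRECONDITION & SPEC =====
-- Pre_: every entry carries a "source" key; on any other input Python's entry["source"] raises KeyError in A (and in B).
def Pre_find_duplicate_sources (entries : List (List (String × String))) : Prop :=
  ∀ e ∈ entries, (e.find? (fun p => p.1 == "source")).isSome
instance (entries : List (List (String × String))) : Decidable (Pre_find_duplicate_sources entries) := by unfold Pre_find_duplicate_sources; infer_instance

def pvWitness_find_duplicate_sources : (List (List (String × String))) :=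
  [[("source", "ko"), ("id", "1")], [("source", "ko"), ("id", "2")], [("source", "x"), ("id", "3")]]

def Spec_find_duplicate_sources (entries : List (List (String × String))) (out : List (String × List (List (String × String)))) : Prop := out = find_duplicate_sources_alt entries
instance (entries : List (List (String × String))) (out : List (String × List (List (String × String)))) : Decidable (Spec_find_duplicate_sources entries out) := by unfold Spec_find_duplicate_sources; infer_instance

-- ===== CLAIM (what is proved, stated in full; the proofs are below) =====
def Claim_equal_find_duplicate_sources : Prop := ∀ (entries : List (List (String × String))), Dom_find_duplicate_sources entries → Pre_find_duplicate_sources entries → Spec_find_duplicate_sources entries (find_duplicate_sources entries)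

-- ===== LEMMAS AND PROOFS =====

-- A's "ensure the key is present, then append" step equals a single modify with default [].
lemma pv_step_eq (m : PySem.Dict String (List (List (String × String)))) (k : String)
    (e : List (String × String)) :
    (if m.contains k then m else m.insert k []).modify k [] (fun l => l ++ [e])
      = m.modify k [] (fun l => l ++ [e]) := by
  by_cases h : m.contains k = true
  · simp [h]
  · simp only [Bool.not_eq_true] at h
    simp [h, PySem.Dict.modify, PySem.Dict.getD_insert_self, PySem.Dict.insert_insert_self,
      PySem.Dict.getD_of_not_contains]

-- The two ports agree on every input (A's grouping dict, read off as keys-in-first-appearance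
-- order with per-key groups, is exactly B's distinct-sources pass plus per-source filters).
lemma pv_ports_eq (entries : List (List (String × String))) :
    find_duplicate_sources entries = find_duplicate_sources_alt entries := by
  unfold find_duplicate_sources find_duplicate_sources_alt
  dsimp only
  have hfn : (fun (m : PySem.Dict String (List (List (String × String)))) entry =>
      let src := pvSrc entry
      let m := if m.contains src then m else m.insert src []
      m.modify src [] (fun l => l ++ [entry]))
      = fun m entry => m.modify (pvSrc entry) [] (fun l => l ++ [entry]) := by
    funext m entry
    exact pv_step_eq m (pvSrc entry) entry
  rw [hfn]
  set M := entries.foldl (fun m entry => m.modify (pvSrc entry) [] (fun l => l ++ [entry])) PySem.Dict.empty with hM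
  have hfold : M = (entries.map (fun e => (pvSrc e, e))).foldl
      (fun d (p : String × List (String × String)) => d.modify p.1 [] (fun l => l ++ [p.2])) PySem.Dict.empty := by
    rw [hM, List.foldl_map]
  have hnd : M.keys.Nodup := by
    rw [hM]
    exact PySem.Dict.nodup_keys_foldl_modify_key entries pvSrc [] (fun d e l => l ++ [e]) _ (by simp)
  have hkeys : M.keys = PySem.Set.ofList (entries.map pvSrc) := by
    rw [hM, PySem.Dict.keys_foldl_modify_key]
    simp [PySem.Set.update_nil_left]
  have hgetD : ∀ k, M.getD k [] = entries.filter (fun e => pvSrc e == k) := by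
    intro k
    rw [hfold, PySem.Dict.getD_foldl_modify_append]
    simp [List.filter_map, Function.comp_def]
  rw [PySem.Dict.items_eq_map_keys M hnd []]
  have hseen : (entries.foldl (fun s entry => PySem.Set.add s (pvSrc entry)) [])
      = PySem.Set.ofList (entries.map pvSrc) := by
    rw [← PySem.Set.update_map_eq_foldl_add, PySem.Set.update_nil_left]
  rw [hseen, ← hkeys]
  have happ := PySem.List.foldl_append_if
      (fun src => decide ((entries.filter (fun e => pvSrc e == src)).length > 1))
      (fun src => (src, entries.filter (fun e => pvSrc e == src))) (l := M.keys) (acc := [])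
  simp only [decide_eq_true_eq] at happ
  rw [happ]
  simp only [hgetD]
  simp [List.filter_map, Function.comp_def]

-- ===== VERDICT (by name: the statement is the Claim_ definition above) =====
theorem find_duplicate_sources_spec : Claim_equal_find_duplicate_sources := by
  intro entries _ _
  exact pv_ports_eq entries
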